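-- pv_equiv track=rewrite | github.com/StrongerProgrammer7/cryptographicalProtocol | MyMath.py | generateSignVariations
-- ===== SOURCE A (Python) =====
-- import itertools
--
-- def generateSignVariations(matrix): #Все вариации знаков (-1,+1)
--     rows, cols = len(matrix), len(matrix[0])
--     sign_variations = []
--
--     for signs in itertools.product([-1, 1], repeat=rows):
--         variation = [matrix[i].copy() for i in range(rows)]
--         for i, sign in enumerate(signs):
--             variation[i][0] *= sign
--         sign_variations.append(variation)
--
--     return sign_variations
-- ===== SOURCE B (Python) =====
-- def generateSignVariations(matrix):
--     def go(rows):
--         # all sign variations of `rows`, -1 before +1, later rows varying fastest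
--         if not rows:
--             return [[]]
--         row, rest = rows[0], go(rows[1:])
--         neg = [-row[0]] + row[1:]
--         pos = [row[0]] + row[1:]
--         return ([[list(neg)] + [list(r) for r in tail] for tail in rest]
--               + [[list(pos)] + [list(r) for r in tail] for tail in rest])
--     return go(matrix)
-- ===== Notes on version B (the rewrite author's own statement) =====
-- stated objective: alternative
-- what changed: Replaces itertools.product over sign tuples followed by per-tuple row copying and in-place sign mutation with a direct structural recursion on the row list that builds each variation front-to-back (sign -1 branch before +1), never materialising sign tuples.
import Mathlib
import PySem

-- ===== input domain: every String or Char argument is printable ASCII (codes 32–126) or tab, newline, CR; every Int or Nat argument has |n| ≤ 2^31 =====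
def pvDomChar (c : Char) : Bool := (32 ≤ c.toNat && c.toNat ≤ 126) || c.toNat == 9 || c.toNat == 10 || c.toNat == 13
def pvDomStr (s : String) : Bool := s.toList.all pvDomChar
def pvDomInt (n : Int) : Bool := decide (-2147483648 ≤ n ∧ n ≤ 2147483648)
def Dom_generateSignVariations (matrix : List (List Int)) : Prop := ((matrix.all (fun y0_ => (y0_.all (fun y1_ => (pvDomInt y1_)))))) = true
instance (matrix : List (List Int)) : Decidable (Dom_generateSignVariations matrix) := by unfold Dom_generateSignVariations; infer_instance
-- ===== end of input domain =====

-- B replaces itertools.product over sign tuples with a structural recursion on the row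
-- list building each variation directly (alternative decomposition, same asymptotic cost).


-- ===== PORT A =====
-- itertools.product([-1, 1], repeat=n): first coordinate varies slowest, -1 before 1
def prodSigns : Nat → List (List Int)
  | 0 => [[]]
  | n + 1 => [(-1 : Int), 1].flatMap (fun s => (prodSigns n).map (fun t => s :: t))

-- variation[i][0] *= sign applied to one (copied) row
def mulHeadA (row : List Int) (s : Int) : List Int :=
  match row with
  | [] => []
  | h :: t => (h * s) :: t

def generateSignVariations (matrix : List (List Int)) : List (List (List Int)) :=
  (prodSigns matrix.length).map (fun signs => List.zipWith mulHeadA matrix signs)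

-- ===== PORT B =====
-- [s*row[0]] + row[1:]
def mulHeadB (s : Int) (row : List Int) : List Int :=
  match row with
  | [] => []
  | h :: t => (s * h) :: t

-- go(rows): sign -1 branch first, then +1, recursing on the remaining rows
def altGo : List (List Int) → List (List (List Int))
  | [] => [[]]
  | r :: rs =>
      let rest := altGo rs
      let neg := mulHeadB (-1) r
      let pos := mulHeadB 1 r
      rest.map (fun tail => neg :: tail) ++ rest.map (fun tail => pos :: tail)

def generateSignVariations_alt (matrix : List (List Int)) : List (List (List Int)) :=
  altGo matrix

-- ===== PRECONDITION & SPEC =====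
-- Pre_ excludes exactly the inputs where A raises IndexError: the empty matrix
-- (matrix[0]) and matrices containing an empty row (variation[i][0]).
def Pre_generateSignVariations (matrix : List (List Int)) : Prop :=
  matrix ≠ [] ∧ ∀ row ∈ matrix, row ≠ []
instance (matrix : List (List Int)) : Decidable (Pre_generateSignVariations matrix) := by
  unfold Pre_generateSignVariations; infer_instance

def pvWitness_generateSignVariations : List (List Int) := [[1, 2], [3]]

def Spec_generateSignVariations (matrix : List (List Int)) (out : List (List (List Int))) : Prop :=
  out = generateSignVariations_alt matrix
instance (matrix : List (List Int)) (out : List (List (List Int))) : Decidable (Spec_generateSignVariations matrix out) := by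
  unfold Spec_generateSignVariations; infer_instance

-- ===== CLAIM =====
def Claim_equal_generateSignVariations : Prop := ∀ (matrix : List (List Int)), Dom_generateSignVariations matrix → Pre_generateSignVariations matrix → Spec_generateSignVariations matrix (generateSignVariations matrix)

-- ===== LEMMAS AND PROOFS =====
lemma mulHeadA_comm (r : List Int) (s : Int) : mulHeadA r s = mulHeadB s r := by
  cases r with
  | nil => rfl
  | cons h t => simp [mulHeadA, mulHeadB, Int.mul_comm]

lemma main_eq (matrix : List (List Int)) :
    (prodSigns matrix.length).map (fun signs => List.zipWith mulHeadA matrix signs) = altGo matrix := by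
  induction matrix with
  | nil => rfl
  | cons r rs ih =>
      simp only [List.length_cons, prodSigns, altGo, List.flatMap_cons, List.flatMap_nil,
        List.map_append, List.map_map, List.append_nil, Function.comp_def, List.zipWith_cons_cons,
        mulHeadA_comm, ← ih, List.map_map]

-- ===== VERDICT =====
theorem generateSignVariations_spec : Claim_equal_generateSignVariations := by
  intro matrix _ _
  unfold Spec_generateSignVariations generateSignVariations generateSignVariations_alt
  exact main_eq matrix
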